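-- pv_equiv track=rewrite | github.com/RelationalAI/logical-query-protocol | python-tools/src/meta/yacc_grammar.py | _find_action_braces
-- ===== SOURCE A (Python) =====
-- from typing import Dict, List, Optional, Tuple, Set
--
-- def _find_action_braces(text: str) -> Tuple[int, int]:
--     """Find the action braces in rule text, ignoring braces inside string literals.
--
--     Returns (brace_start, brace_end) indices, or (-1, -1) if not found.
--     """
--     i = 0
--     while i < len(text):
--         c = text[i]
--         if c == '"':
--             # Skip string literal
--             i += 1
--             while i < len(text) and text[i] != '"':
--                 if text[i] == '\\':
--                     i += 2
--                 else:
--                     i += 1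
--             i += 1  # Skip closing quote
--         elif c == '{':
--             # Found the action start
--             brace_start = i
--             # Find matching close brace
--             depth = 1
--             i += 1
--             while i < len(text) and depth > 0:
--                 if text[i] == '{':
--                     depth += 1
--                 elif text[i] == '}':
--                     depth -= 1
--                 elif text[i] == '"':
--                     # Skip string literal inside action
--                     i += 1
--                     while i < len(text) and text[i] != '"':
--                         if text[i] == '\\':
--                             i += 2
--                         else:
--                             i += 1
--                 i += 1
--             if depth == 0:
--                 return brace_start, i - 1
--             return brace_start, -1
--         else:
--             i += 1
--     return -1, -1
-- ===== SOURCE B (Python) =====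
-- def _find_action_braces(text):
--     # Phase 1: mark which positions lie inside string literals (quotes and
--     # escaped characters included).
--     mask = []
--     in_s = False
--     esc = False
--     for c in text:
--         if esc:
--             mask.append(True)
--             esc = False
--         elif in_s:
--             mask.append(True)
--             if c == '\\':
--                 esc = True
--             elif c == '"':
--                 in_s = False
--         else:
--             mask.append(c == '"')
--             if c == '"':
--                 in_s = True
--     # Phase 2: first unmasked '{' is the action start.
--     start = -1
--     for j, (c, m) in enumerate(zip(text, mask)):
--         if c == '{' and not m:
--             start = j
--             break
--     if start == -1:
--         return (-1, -1)
--     # Phase 3: walk the unmasked braces to find the matching '}'.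
--     depth = 0
--     for j in range(start, len(text)):
--         if not mask[j]:
--             if text[j] == '{':
--                 depth += 1
--             elif text[j] == '}':
--                 depth -= 1
--                 if depth == 0:
--                     return (start, j)
--     return (start, -1)
-- ===== Notes on version B (the rewrite author's own statement) =====
-- stated objective: alternative
-- what changed: Replaces A's single-pass state machine with index-jumping string skips by a two-phase decomposition: one pass builds a boolean mask of string-literal positions (escapes handled by a flag instead of index jumps), then separate scans over the mask find the first unmasked opening brace and its matching unmasked closing brace.
import Mathlib
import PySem

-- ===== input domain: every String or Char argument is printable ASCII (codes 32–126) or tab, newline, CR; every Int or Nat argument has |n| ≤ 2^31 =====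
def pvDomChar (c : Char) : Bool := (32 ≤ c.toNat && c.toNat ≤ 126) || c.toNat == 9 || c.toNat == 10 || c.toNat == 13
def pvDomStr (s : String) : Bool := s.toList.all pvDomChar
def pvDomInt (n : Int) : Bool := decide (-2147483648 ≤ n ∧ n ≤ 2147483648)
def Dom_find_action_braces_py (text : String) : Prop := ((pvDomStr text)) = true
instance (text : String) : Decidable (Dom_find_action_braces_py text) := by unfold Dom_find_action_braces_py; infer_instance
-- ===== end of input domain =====

-- B replaces A's single-pass index-jumping state machine by a two-phase
-- decomposition: first build a boolean mask of string-literal positions,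
-- then scan the mask for the action braces (objective: alternative).

-- ===== PORT A =====

-- Python's inner `while i < len(text) and text[i] != '"':` string-skip loop:
-- takes the list suffix at position i and i itself, returns the suffix and index
-- where the loop stops (at the closing quote, or past the end).
def skipStrA : List Char → Nat → List Char × Nat
  | [], i => ([], i)
  | c :: cs, i =>
    if c = '"' then (c :: cs, i)
    else if c = '\\' then
      match cs with
      | [] => ([], i + 2)          -- i += 2 runs past the end
      | _ :: cs' => skipStrA cs' (i + 2)
    else skipStrA cs (i + 1)

theorem skipStrA_len (cs : List Char) (i : Nat) : (skipStrA cs i).1.length ≤ cs.length := by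
  induction cs, i using skipStrA.induct with
  | case1 i => rw [skipStrA.eq_def]
  | case2 cs i => rw [skipStrA.eq_def]; simp
  | case3 i h => rw [skipStrA.eq_def]; simp
  | case4 i head cs' h ih => rw [skipStrA.eq_def]; simp; omega
  | case5 c cs i h1 h2 ih => rw [skipStrA.eq_def]; simp [h1, h2]; omega

-- the inner `while i < len(text) and depth > 0:` loop (state: suffix, depth, i, brace_start)
def innerA : List Char → Int → Nat → Int → Int × Int
  | rem, d, i, start =>
    if 0 < d then
      match rem with
      | [] => (start, -1)                      -- loop ends with depth > 0
      | c :: cs =>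
        if c = '{' then innerA cs (d + 1) (i + 1) start
        else if c = '}' then innerA cs (d - 1) (i + 1) start
        else if c = '"' then
          let p := skipStrA cs (i + 1)
          innerA p.1.tail d (p.2 + 1) start
        else innerA cs d (i + 1) start
    else if d = 0 then (start, (i : Int) - 1) else (start, -1)
  termination_by rem _ _ _ => rem.length
  decreasing_by
    · simp
    · simp
    · have := skipStrA_len cs (i + 1)
      simp [List.length_tail]
      omega
    · simp

-- the outer `while i < len(text):` loop
def outerA : List Char → Nat → Int × Int
  | [], _ => (-1, -1)
  | c :: cs, i =>
    if c = '"' then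
      let p := skipStrA cs (i + 1)
      outerA p.1.tail (p.2 + 1)
    else if c = '{' then innerA cs 1 (i + 1) (i : Int)
    else outerA cs (i + 1)
  termination_by rem _ => rem.length
  decreasing_by
    · have := skipStrA_len cs (i + 1)
      simp [List.length_tail]
      omega
    · simp

def find_action_braces_py (text : String) : Int × Int := outerA text.toList 0

-- ===== PORT B =====

-- phase 1 of Source B: boolean mask of string-literal positions (state: in_s, esc)
def mkMask : List Char → Bool → Bool → List Bool
  | [], _, _ => []
  | c :: cs, inS, esc =>
    if esc then true :: mkMask cs inS false
    else if inS then true :: mkMask cs (decide (c ≠ '"')) (decide (c = '\\'))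
    else decide (c = '"') :: mkMask cs (decide (c = '"')) false

-- phase 2 of Source B: index of the first unmasked '{'
def findStart : List Char → List Bool → Nat → Option Nat
  | c :: cs, m :: ms, j => if c = '{' ∧ m = false then some j else findStart cs ms (j + 1)
  | _, _, _ => none

-- phase 3 of Source B: walk unmasked braces from the start, return matching '}' index
def scanDepth : List Char → List Bool → Nat → Int → Option Nat
  | c :: cs, m :: ms, j, d =>
    if m then scanDepth cs ms (j + 1) d
    else if c = '{' then scanDepth cs ms (j + 1) (d + 1)
    else if c = '}' then (if d - 1 = 0 then some j else scanDepth cs ms (j + 1) (d - 1))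
    else scanDepth cs ms (j + 1) d
  | _, _, _, _ => none

def find_action_braces_py_alt (text : String) : Int × Int :=
  let cs := text.toList
  let ms := mkMask cs false false
  match findStart cs ms 0 with
  | none => (-1, -1)
  | some s =>
    match scanDepth (cs.drop s) (ms.drop s) s 0 with
    | some e => ((s : Int), (e : Int))
    | none => ((s : Int), -1)

-- ===== PRECONDITION & SPEC =====
def Spec_find_action_braces_py (text : String) (out : Int × Int) : Prop := out = find_action_braces_py_alt text
instance (text : String) (out : Int × Int) : Decidable (Spec_find_action_braces_py text out) := by unfold Spec_find_action_braces_py; infer_instance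

-- ===== CLAIM (what is proved, stated in full; the proofs are below) =====
def Claim_equal_find_action_braces_py : Prop := ∀ (text : String), Dom_find_action_braces_py text → Spec_find_action_braces_py text (find_action_braces_py text)

-- ===== LEMMAS AND PROOFS =====

-- B's whole result, computed from an arbitrary suffix with base index i
def OuterRhs (rem : List Char) (ms : List Bool) (i : Nat) : Int × Int :=
  match findStart rem ms i with
  | none => (-1, -1)
  | some s =>
    match scanDepth (rem.drop (s - i)) (ms.drop (s - i)) s 0 with
    | some e => ((s : Int), (e : Int))
    | none => ((s : Int), -1)

-- step lemmas for the ports and helpers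
theorem skipStrA_quote (cs : List Char) (i : Nat) : skipStrA ('"' :: cs) i = ('"' :: cs, i) := by
  rw [skipStrA.eq_def]; simp

theorem skipStrA_bs_nil (i : Nat) : skipStrA ['\\'] i = ([], i + 2) := by
  rw [skipStrA.eq_def]; simp

theorem skipStrA_bs (c : Char) (cs : List Char) (i : Nat) :
    skipStrA ('\\' :: c :: cs) i = skipStrA cs (i + 2) := by
  rw [skipStrA.eq_def]; simp

theorem skipStrA_other (c : Char) (cs : List Char) (i : Nat) (h1 : c ≠ '"') (h2 : c ≠ '\\') :
    skipStrA (c :: cs) i = skipStrA cs (i + 1) := by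
  rw [skipStrA.eq_def]; simp [h1, h2]

theorem mkMask_nil (a b : Bool) : mkMask [] a b = [] := rfl

theorem mkMask_esc (c : Char) (cs : List Char) (inS : Bool) :
    mkMask (c :: cs) inS true = true :: mkMask cs inS false := by
  rw [mkMask.eq_def]; simp

theorem mkMask_inS (c : Char) (cs : List Char) :
    mkMask (c :: cs) true false = true :: mkMask cs (decide (c ≠ '"')) (decide (c = '\\')) := by
  rw [mkMask.eq_def]; simp

theorem mkMask_out (c : Char) (cs : List Char) :
    mkMask (c :: cs) false false = decide (c = '"') :: mkMask cs (decide (c = '"')) false := by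
  rw [mkMask.eq_def]; simp

theorem findStart_nil (ms : List Bool) (j : Nat) : findStart [] ms j = none := by
  rw [findStart.eq_def]

theorem findStart_hit (cs : List Char) (ms : List Bool) (j : Nat) :
    findStart ('{' :: cs) (false :: ms) j = some j := by
  rw [findStart.eq_def]; simp

theorem findStart_skip (c : Char) (m : Bool) (cs : List Char) (ms : List Bool) (j : Nat)
    (h : ¬ (c = '{' ∧ m = false)) : findStart (c :: cs) (m :: ms) j = findStart cs ms (j + 1) := by
  rw [findStart.eq_def]; simp only [if_neg h]

theorem scanDepth_nil (ms : List Bool) (j : Nat) (d : Int) : scanDepth [] ms j d = none := by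
  rw [scanDepth.eq_def]

theorem scanDepth_mask (c : Char) (cs : List Char) (ms : List Bool) (j : Nat) (d : Int) :
    scanDepth (c :: cs) (true :: ms) j d = scanDepth cs ms (j + 1) d := by
  rw [scanDepth.eq_def]; simp

theorem scanDepth_open (cs : List Char) (ms : List Bool) (j : Nat) (d : Int) :
    scanDepth ('{' :: cs) (false :: ms) j d = scanDepth cs ms (j + 1) (d + 1) := by
  rw [scanDepth.eq_def]; simp

theorem scanDepth_close (cs : List Char) (ms : List Bool) (j : Nat) (d : Int) :
    scanDepth ('}' :: cs) (false :: ms) j d =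
      if d - 1 = 0 then some j else scanDepth cs ms (j + 1) (d - 1) := by
  rw [scanDepth.eq_def]; simp

theorem scanDepth_other (c : Char) (cs : List Char) (ms : List Bool) (j : Nat) (d : Int)
    (h1 : c ≠ '{') (h2 : c ≠ '}') :
    scanDepth (c :: cs) (false :: ms) j d = scanDepth cs ms (j + 1) d := by
  rw [scanDepth.eq_def]; simp [h1, h2]

theorem innerA_stop (rem : List Char) (d : Int) (i : Nat) (start : Int) (h : ¬ 0 < d) :
    innerA rem d i start = if d = 0 then (start, (i : Int) - 1) else (start, -1) := by
  rw [innerA.eq_def]; simp [h]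

theorem innerA_nil (d : Int) (i : Nat) (start : Int) (h : 0 < d) :
    innerA [] d i start = (start, -1) := by
  rw [innerA.eq_def]; simp [h]

theorem innerA_open (cs : List Char) (d : Int) (i : Nat) (start : Int) (h : 0 < d) :
    innerA ('{' :: cs) d i start = innerA cs (d + 1) (i + 1) start := by
  rw [innerA.eq_def]; simp [h]

theorem innerA_close (cs : List Char) (d : Int) (i : Nat) (start : Int) (h : 0 < d) :
    innerA ('}' :: cs) d i start = innerA cs (d - 1) (i + 1) start := by
  rw [innerA.eq_def]; simp [h]

theorem innerA_quote (cs : List Char) (d : Int) (i : Nat) (start : Int) (h : 0 < d) :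
    innerA ('"' :: cs) d i start =
      innerA (skipStrA cs (i + 1)).1.tail d ((skipStrA cs (i + 1)).2 + 1) start := by
  rw [innerA.eq_def]; simp [h]

theorem innerA_other (c : Char) (cs : List Char) (d : Int) (i : Nat) (start : Int) (h : 0 < d)
    (h1 : c ≠ '{') (h2 : c ≠ '}') (h3 : c ≠ '"') :
    innerA (c :: cs) d i start = innerA cs d (i + 1) start := by
  rw [innerA.eq_def]; simp [h, h1, h2, h3]

theorem outerA_quote (cs : List Char) (i : Nat) :
    outerA ('"' :: cs) i = outerA (skipStrA cs (i + 1)).1.tail ((skipStrA cs (i + 1)).2 + 1) := by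
  rw [outerA.eq_def]; simp

theorem outerA_open (cs : List Char) (i : Nat) :
    outerA ('{' :: cs) i = innerA cs 1 (i + 1) (i : Int) := by
  rw [outerA.eq_def]; simp

theorem outerA_other (c : Char) (cs : List Char) (i : Nat) (h1 : c ≠ '{') (h3 : c ≠ '"') :
    outerA (c :: cs) i = outerA cs (i + 1) := by
  rw [outerA.eq_def]; simp [h1, h3]

theorem OuterRhs_nil (ms : List Bool) (i : Nat) : OuterRhs [] ms i = (-1, -1) := by
  unfold OuterRhs; rw [findStart_nil]

theorem findStart_ge : ∀ (cs : List Char) (ms : List Bool) (j s : Nat),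
    findStart cs ms j = some s → j ≤ s := by
  intro cs
  induction cs with
  | nil => intro ms j s h; rw [findStart_nil] at h; exact absurd h (by simp)
  | cons c cs ih =>
    intro ms j s h
    cases ms with
    | nil => rw [findStart.eq_def] at h; simp at h
    | cons m ms =>
      by_cases hc : c = '{' ∧ m = false
      · rw [findStart.eq_def] at h
        simp [hc.1, hc.2] at h
        omega
      · rw [findStart_skip c m cs ms j hc] at h
        have := ih ms (j + 1) s h
        omega

-- skipping one head that is masked or not an opening brace
theorem OuterRhs_skip (c : Char) (m : Bool) (cs : List Char) (ms : List Bool) (i : Nat)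
    (h : m = true ∨ c ≠ '{') : OuterRhs (c :: cs) (m :: ms) i = OuterRhs cs ms (i + 1) := by
  have hcond : ¬ (c = '{' ∧ m = false) := by
    rcases h with h | h
    · simp [h]
    · simp [h]
  unfold OuterRhs
  rw [findStart_skip c m cs ms i hcond]
  cases hfs : findStart cs ms (i + 1) with
  | none => rfl
  | some s =>
    have hge := findStart_ge cs ms (i + 1) s hfs
    have hd1 : List.drop (s - i) (c :: cs) = List.drop (s - (i + 1)) cs := by
      rw [show s - i = (s - (i + 1)) + 1 by omega, List.drop_succ_cons]
    have hd2 : List.drop (s - i) (m :: ms) = List.drop (s - (i + 1)) ms := by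
      rw [show s - i = (s - (i + 1)) + 1 by omega, List.drop_succ_cons]
    simp [hd1, hd2]

theorem str_outer (cs : List Char) (i : Nat) :
    OuterRhs cs (mkMask cs true false) i =
      OuterRhs (skipStrA cs i).1.tail (mkMask (skipStrA cs i).1.tail false false)
        ((skipStrA cs i).2 + 1) := by
  induction cs, i using skipStrA.induct with
  | case1 i =>
      rw [show skipStrA ([] : List Char) i = ([], i) from rfl]
      simp [mkMask_nil, OuterRhs_nil]
  | case2 cs i =>
      rw [skipStrA_quote]
      simp only [List.tail_cons]
      rw [mkMask_inS]
      rw [show (decide ('"' ≠ '"')) = false by decide, show (decide ('"' = '\\')) = false by decide]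
      exact OuterRhs_skip _ _ _ _ _ (Or.inl rfl)
  | case3 i h =>
      rw [skipStrA_bs_nil]
      rw [mkMask_inS]
      simp only [List.tail_nil]
      rw [mkMask_nil, mkMask_nil]
      rw [OuterRhs_skip _ _ _ _ _ (Or.inl rfl), OuterRhs_nil, OuterRhs_nil]
  | case4 i head cs' h ih =>
      rw [skipStrA_bs]
      rw [mkMask_inS]
      rw [show (decide ('\\' ≠ '"')) = true by decide, show (decide ('\\' = '\\')) = true by decide]
      rw [mkMask_esc]
      rw [OuterRhs_skip _ _ _ _ _ (Or.inl rfl), OuterRhs_skip _ _ _ _ _ (Or.inl rfl)]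
      exact ih
  | case5 c cs i h1 h2 ih =>
      rw [skipStrA_other c cs i h1 h2]
      rw [mkMask_inS]
      rw [show (decide (c ≠ '"')) = true by simp [h1], show (decide (c = '\\')) = false by simp [h2]]
      rw [OuterRhs_skip _ _ _ _ _ (Or.inl rfl)]
      exact ih

theorem str_scan (cs : List Char) (i : Nat) (d : Int) :
    scanDepth cs (mkMask cs true false) i d =
      scanDepth (skipStrA cs i).1.tail (mkMask (skipStrA cs i).1.tail false false)
        ((skipStrA cs i).2 + 1) d := by
  induction cs, i using skipStrA.induct with
  | case1 i =>
      rw [show skipStrA ([] : List Char) i = ([], i) from rfl]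
      simp [mkMask_nil, scanDepth_nil]
  | case2 cs i =>
      rw [skipStrA_quote]
      simp only [List.tail_cons]
      rw [mkMask_inS]
      rw [show (decide ('"' ≠ '"')) = false by decide, show (decide ('"' = '\\')) = false by decide]
      exact scanDepth_mask _ _ _ _ _
  | case3 i h =>
      rw [skipStrA_bs_nil]
      rw [mkMask_inS]
      simp only [List.tail_nil]
      rw [mkMask_nil, mkMask_nil]
      rw [scanDepth_mask, scanDepth_nil, scanDepth_nil]
  | case4 i head cs' h ih =>
      rw [skipStrA_bs]
      rw [mkMask_inS]
      rw [show (decide ('\\' ≠ '"')) = true by decide, show (decide ('\\' = '\\')) = true by decide]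
      rw [mkMask_esc]
      rw [scanDepth_mask, scanDepth_mask]
      exact ih
  | case5 c cs i h1 h2 ih =>
      rw [skipStrA_other c cs i h1 h2]
      rw [mkMask_inS]
      rw [show (decide (c ≠ '"')) = true by simp [h1], show (decide (c = '\\')) = false by simp [h2]]
      rw [scanDepth_mask]
      exact ih

theorem inner_eq : ∀ (n : Nat) (cs : List Char), cs.length ≤ n → ∀ (d : Int), 0 < d →
    ∀ (i : Nat) (start : Int),
    innerA cs d i start =
      (match scanDepth cs (mkMask cs false false) i d with
       | some e => (start, (e : Int))
       | none => (start, -1)) := by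
  intro n
  induction n with
  | zero =>
    intro cs hlen d hd i start
    have : cs = [] := by cases cs <;> simp_all
    subst this
    rw [innerA_nil d i start hd, scanDepth_nil]
  | succ n ih =>
    intro cs hlen d hd i start
    cases cs with
    | nil => rw [innerA_nil d i start hd, scanDepth_nil]
    | cons c cs =>
      have hlen' : cs.length ≤ n := by simp at hlen; omega
      by_cases h1 : c = '{'
      · subst h1
        rw [innerA_open cs d i start hd, mkMask_out]
        rw [show (decide ('{' = '"')) = false by decide]
        rw [scanDepth_open]
        exact ih cs hlen' (d + 1) (by omega) (i + 1) start
      · by_cases h2 : c = '}'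
        · subst h2
          rw [innerA_close cs d i start hd, mkMask_out]
          rw [show (decide ('}' = '"')) = false by decide]
          rw [scanDepth_close]
          by_cases hd1 : d - 1 = 0
          · rw [if_pos hd1]
            rw [innerA_stop cs (d - 1) (i + 1) start (by omega), if_pos hd1]
            simp
          · rw [if_neg hd1]
            exact ih cs hlen' (d - 1) (by omega) (i + 1) start
        · by_cases h3 : c = '"'
          · subst h3
            rw [innerA_quote cs d i start hd, mkMask_out]
            rw [show (decide ('"' = '"')) = true by decide]
            rw [scanDepth_mask, str_scan cs (i + 1) d]
            have hl : (skipStrA cs (i + 1)).1.tail.length ≤ n := by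
              have h4 := skipStrA_len cs (i + 1)
              have h5 : (skipStrA cs (i + 1)).1.tail.length ≤ (skipStrA cs (i + 1)).1.length := by
                simp
              omega
            exact ih _ hl d hd _ start
          · rw [innerA_other c cs d i start hd h1 h2 h3, mkMask_out]
            rw [show (decide (c = '"')) = false by simp [h3]]
            rw [scanDepth_other c cs _ i d h1 h2]
            exact ih cs hlen' d hd (i + 1) start

theorem outer_eq : ∀ (n : Nat) (cs : List Char), cs.length ≤ n → ∀ (i : Nat),
    outerA cs i = OuterRhs cs (mkMask cs false false) i := by
  intro n
  induction n with
  | zero =>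
    intro cs hlen i
    have : cs = [] := by cases cs <;> simp_all
    subst this
    simp [outerA, OuterRhs_nil]
  | succ n ih =>
    intro cs hlen i
    cases cs with
    | nil => simp [outerA, OuterRhs_nil]
    | cons c cs =>
      have hlen' : cs.length ≤ n := by simp at hlen; omega
      by_cases h3 : c = '"'
      · subst h3
        rw [outerA_quote, mkMask_out]
        rw [show (decide ('"' = '"')) = true by decide]
        rw [OuterRhs_skip _ _ _ _ _ (Or.inl rfl), str_outer cs (i + 1)]
        have hl : (skipStrA cs (i + 1)).1.tail.length ≤ n := by
          have h4 := skipStrA_len cs (i + 1)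
          have h5 : (skipStrA cs (i + 1)).1.tail.length ≤ (skipStrA cs (i + 1)).1.length := by
            simp
          omega
        exact ih _ hl _
      · by_cases h1 : c = '{'
        · subst h1
          rw [outerA_open, mkMask_out]
          rw [show (decide ('{' = '"')) = false by decide]
          unfold OuterRhs
          rw [findStart_hit]
          simp only [Nat.sub_self, List.drop_zero]
          rw [scanDepth_open]
          rw [inner_eq n cs hlen' 1 (by omega) (i + 1) (i : Int)]
          norm_num
        · rw [outerA_other c cs i h1 h3, mkMask_out]
          rw [show (decide (c = '"')) = false by simp [h3]]
          rw [OuterRhs_skip _ _ _ _ _ (Or.inr h1)]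
          exact ih cs hlen' (i + 1)

-- ===== VERDICT (by name: the statement is the Claim_ definition above) =====
theorem find_action_braces_py_spec : Claim_equal_find_action_braces_py := by
  intro text _
  unfold Spec_find_action_braces_py find_action_braces_py find_action_braces_py_alt
  rw [outer_eq text.toList.length text.toList le_rfl 0]
  unfold OuterRhs
  simp
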